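-- pv_equiv track=rewrite | github.com/Alatar98/DFSS | TSST.py | _word_interactor
-- ===== SOURCE A (Python) =====
-- def _word_interactor_backend(string,words,M,comb):
--     'only used by word_interactor'
--     comb.append(string)
--     words_copy=words.copy()
--     for word in words:
--         if M==1:
--             comb.append(string+"*"+word)
--         else:
--             words_copy.remove(word)
--             _word_interactor_backend(string+"*"+word,words_copy,M-1,comb)
--
-- def _word_interactor(words,M=2):
--     'returns all possible interactions with words up to degree M.'
--     #m must be smaller then len(words)
--     if M>len(words):
--         M=len(words)
--     comb=[]
--     words_copy=words.copy()
--     for word in words: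
--         words_copy.remove(word)
--         _word_interactor_backend(word,words_copy,M-1,comb)
--     return comb
-- ===== SOURCE B (Python) =====
-- def _word_interactor(words, M=2):
--     'returns all possible interactions with words up to degree M.'
--     if M > len(words):
--         M = len(words)
--     comb = []
--     n = len(words)
--     # explicit DFS stack of (string, remaining_words, m); seeded in reverse so
--     # frames pop in original order
--     stack = [(words[i], words[i + 1:], M - 1) for i in range(n - 1, -1, -1)]
--     while stack:
--         s, rest, m = stack.pop()
--         comb.append(s)
--         if m == 1:
--             for w in rest:
--                 comb.append(s + "*" + w)
--         else:
--             for j in range(len(rest) - 1, -1, -1):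
--                 stack.append((s + "*" + rest[j], rest[j + 1:], m - 1))
--     return comb
-- ===== Notes on version B (the rewrite author's own statement) =====
-- stated objective: alternative
-- what changed: Replaces the two mutually recursive functions (sharing a mutated words_copy via list.remove) with a single iterative DFS using an explicit stack of (string, remaining_suffix, m) frames built from list slices, pushed in reverse so frames pop in the original order.
import Mathlib
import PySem

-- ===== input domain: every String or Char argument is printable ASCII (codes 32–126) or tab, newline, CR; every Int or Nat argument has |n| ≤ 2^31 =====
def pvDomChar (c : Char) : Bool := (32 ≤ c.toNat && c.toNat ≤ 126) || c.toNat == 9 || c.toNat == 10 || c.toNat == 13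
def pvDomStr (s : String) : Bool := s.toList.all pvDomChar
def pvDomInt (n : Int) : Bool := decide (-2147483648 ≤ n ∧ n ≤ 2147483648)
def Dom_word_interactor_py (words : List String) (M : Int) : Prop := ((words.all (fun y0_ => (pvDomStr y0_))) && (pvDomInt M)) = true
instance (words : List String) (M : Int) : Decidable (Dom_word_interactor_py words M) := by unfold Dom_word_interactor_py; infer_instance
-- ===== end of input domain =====

-- B replaces A's pair of mutually recursive functions by one explicit-stack DFS loop
-- (same output order, same cost; objective: alternative decomposition).

-- ===== PORT A =====
-- helper for termination of the A port: a successful remove shortens the list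
theorem pv_remove_length {xs ys : List String} {v : String}
    (h : PySem.List.remove? xs v = some ys) : ys.length < xs.length := by
  have hv : v ∈ xs := by
    by_contra hv
    rw [(PySem.List.remove?_eq_none_iff xs v).mpr hv] at h
    cases h
  rw [PySem.List.remove?_eq_some_erase xs v hv] at h
  cases h
  have h1 := List.length_erase_of_mem hv
  have h2 : 0 < xs.length := List.length_pos_of_mem hv
  omega

-- _word_interactor_backend: `comb.append(string)`, then for each word either append
-- string+"*"+word (M==1) or remove it from words_copy and recurse.  The `for` loop
-- with the mutated words_copy is the inner recursion aGo (iter = remaining iteration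
-- list, wc = current words_copy, comb threaded).  `words_copy.remove(word)` is
-- PySem.List.remove?; Python never raises here (word is always present: wc is a copy
-- of the list being iterated), the `none` branch is unreachable and returns comb.
mutual
def word_interactor_backend (string : String) (words : List String) (M : Int)
    (comb : List String) : List String :=
  aGo string words words M (comb ++ [string])
termination_by (words.length, words.length + 1)

def aGo (string : String) (iter wc : List String) (M : Int)
    (comb : List String) : List String :=
  match iter with
  | [] => comb
  | word :: rest =>
    if M == 1 then
      aGo string rest wc M (comb ++ [string ++ "*" ++ word])
    else
      match h : PySem.List.remove? wc word with
      | none => comb    -- unreachable: Python would raise ValueError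
      | some wc' =>
        aGo string rest wc' M
          (word_interactor_backend (string ++ "*" ++ word) wc' (M - 1) comb)
termination_by (wc.length, iter.length)
decreasing_by
  all_goals first
    | exact Prod.Lex.right _ (Nat.lt_succ_self _)
    | exact Prod.Lex.right _ (by simp)
    | exact Prod.Lex.left _ _ (pv_remove_length h)
end

-- top-level loop of _word_interactor, same shape as aGo's else-branch
def aTop (iter wc : List String) (M : Int) (comb : List String) : List String :=
  match iter with
  | [] => comb
  | word :: rest =>
    match PySem.List.remove? wc word with
    | none => comb    -- unreachable
    | some wc' => aTop rest wc' M (word_interactor_backend word wc' (M - 1) comb)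

def word_interactor_py (words : List String) (M : Int) : List String :=
  let M := if M > (words.length : Int) then (words.length : Int) else M
  aTop words words M []

-- ===== PORT B =====
-- Source B's stack is a Python list popped from the end, with children (and the seed)
-- pushed in reverse index order; here the stack is the same sequence written
-- top-first (head = next pop), so pushes appear in forward order.

-- `for j in range(len(rest)-1, -1, -1): stack.append((s+"*"+rest[j], rest[j+1:], m-1))`
def bChildren (s : String) (rest : List String) (m : Int) :
    List (String × List String × Int) :=
  match rest with
  | [] => []
  | w :: tl => (s ++ "*" ++ w, tl, m - 1) :: bChildren s tl m

-- `stack = [(words[i], words[i+1:], M-1) for i in range(n-1, -1, -1)]`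
def bSeed (ws : List String) (m : Int) : List (String × List String × Int) :=
  match ws with
  | [] => []
  | w :: tl => (w, tl, m) :: bSeed tl m

def bWeight (stack : List (String × List String × Int)) : Nat :=
  (stack.map (fun f => 2 ^ f.2.1.length)).sum

theorem bWeight_children (s : String) (rest : List String) (m : Int) :
    bWeight (bChildren s rest m) + 1 = 2 ^ rest.length := by
  induction rest with
  | nil => simp [bChildren, bWeight]
  | cons w tl ih =>
    simp only [bChildren, bWeight, List.map_cons, List.sum_cons, List.length_cons] at *
    have : (0:Nat) < 2 ^ tl.length := Nat.two_pow_pos _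
    omega

theorem bWeight_append (a b : List (String × List String × Int)) :
    bWeight (a ++ b) = bWeight a + bWeight b := by
  simp [bWeight]

-- `while stack: s,rest,m = stack.pop(); comb.append(s); …`
def bLoop (stack : List (String × List String × Int)) (comb : List String) :
    List String :=
  match stack with
  | [] => comb
  | (s, rest, m) :: stk =>
    let comb := comb ++ [s]
    if m == 1 then
      bLoop stk (comb ++ rest.map (fun w => s ++ "*" ++ w))
    else
      bLoop (bChildren s rest m ++ stk) comb
termination_by bWeight stack
decreasing_by
  · have : (0:Nat) < 2 ^ rest.length := Nat.two_pow_pos _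
    simp only [bWeight, List.map_cons, List.sum_cons]
    omega
  · rw [bWeight_append]
    have := bWeight_children s rest m
    simp [bWeight] at *; omega

def word_interactor_py_alt (words : List String) (M : Int) : List String :=
  let M := if M > (words.length : Int) then (words.length : Int) else M
  bLoop (bSeed words (M - 1)) []

-- ===== PRECONDITION & SPEC =====
def Spec_word_interactor_py (words : List String) (M : Int) (out : List String) : Prop := out = word_interactor_py_alt words M
instance (words : List String) (M : Int) (out : List String) : Decidable (Spec_word_interactor_py words M out) := by unfold Spec_word_interactor_py; infer_instance

-- ===== CLAIM (what is proved, stated in full; the proofs are below) =====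
def Claim_equal_word_interactor_py : Prop := ∀ (words : List String) (M : Int), Dom_word_interactor_py words M → Spec_word_interactor_py words M (word_interactor_py words M)

-- ===== LEMMAS AND PROOFS =====

-- A's inner loop at M == 1 only appends, never touches words_copy
theorem aGo_one (string : String) (iter wc : List String) (comb : List String) :
    aGo string iter wc 1 comb = comb ++ iter.map (fun w => string ++ "*" ++ w) := by
  induction iter generalizing comb with
  | nil => simp [aGo]
  | cons w tl ih => simp [aGo, ih]

-- key simulation: popping one frame fully equals one backend call
theorem bLoop_frame :
    ∀ n (ws : List String), ws.length ≤ n →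
      ∀ (s : String) (m : Int) stk comb,
        bLoop ((s, ws, m) :: stk) comb =
          bLoop stk (word_interactor_backend s ws m comb) := by
  intro n
  induction n with
  | zero =>
    intro ws hws s m stk comb
    have : ws = [] := List.eq_nil_of_length_eq_zero (Nat.le_zero.mp hws)
    subst this
    by_cases hm : m == 1 <;>
      simp [bLoop, word_interactor_backend, aGo, hm, bChildren]
  | succ n ih =>
    intro ws hws s m stk comb
    by_cases hm : m == 1
    · have hm' : m = 1 := by simpa using hm
      subst hm'
      simp [bLoop, word_interactor_backend, aGo_one]
    · -- else branch: push children, then show the child loop equals aGo on iter=wc=ws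
      have haux : ∀ (iter : List String), iter.length ≤ n + 1 →
          ∀ comb, bLoop (bChildren s iter m ++ stk) comb =
            bLoop stk (aGo s iter iter m comb) := by
        intro iter
        induction iter with
        | nil => intro _ comb; simp [bChildren, aGo]
        | cons w tl ihtl =>
          intro hlen comb
          have h1 : bLoop ((s ++ "*" ++ w, tl, m - 1) :: (bChildren s tl m ++ stk)) comb
              = bLoop (bChildren s tl m ++ stk)
                  (word_interactor_backend (s ++ "*" ++ w) tl (m - 1) comb) :=
            ih tl (by simp at hlen; omega) _ _ _ _
          have h2 := ihtl (by simp at hlen ⊢; omega)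
            (word_interactor_backend (s ++ "*" ++ w) tl (m - 1) comb)
          have h3 : aGo s (w :: tl) (w :: tl) m comb
              = aGo s tl tl m (word_interactor_backend (s ++ "*" ++ w) tl (m - 1) comb) := by
            rw [aGo]
            rw [if_neg (by simp_all)]
            split
            next habs => rw [PySem.List.remove?_cons_self] at habs; cases habs
            next wc' hsome =>
              rw [PySem.List.remove?_cons_self] at hsome
              cases hsome
              rfl
          simp only [bChildren, List.cons_append] at *
          rw [h1, h2, h3]
      rw [show bLoop ((s, ws, m) :: stk) comb
            = bLoop (bChildren s ws m ++ stk) (comb ++ [s]) by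
          simp [bLoop, hm]]
      rw [haux ws (by omega) (comb ++ [s])]
      simp [word_interactor_backend]

-- top-level: seeded stack vs the top loop (invariant wc = iter)
theorem bLoop_seed (ws : List String) (m : Int) (comb : List String) :
    bLoop (bSeed ws (m - 1)) comb = aTop ws ws m comb := by
  induction ws generalizing comb with
  | nil => simp [bSeed, bLoop, aTop]
  | cons w tl ih =>
    simp only [bSeed]
    rw [bLoop_frame tl.length tl le_rfl]
    rw [ih]
    simp [aTop, PySem.List.remove?_cons_self]

-- ===== VERDICT (by name: the statement is the Claim_ definition above) =====
theorem word_interactor_py_spec : Claim_equal_word_interactor_py := by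
  intro words M _
  unfold Spec_word_interactor_py word_interactor_py word_interactor_py_alt
  rw [bLoop_seed]
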